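-- pv_equiv track=rewrite | github.com/sfominx/jsonator | jsonator/output.py | color_diff
-- ===== SOURCE A (Python) =====
-- def color_diff(contents: str) -> str:
--     """Inject the ANSI color codes to the diff."""
--     lines = contents.split("\n")
--     for i, line in enumerate(lines):
--         if line.startswith("+++") or line.startswith("---"):
--             line = "\033[1m" + line + "\033[0m"  # bold, reset
--         elif line.startswith("@@"):
--             line = "\033[36m" + line + "\033[0m"  # cyan, reset
--         elif line.startswith("+"):
--             line = "\033[32m" + line + "\033[0m"  # green, reset
--         elif line.startswith("-"):
--             line = "\033[31m" + line + "\033[0m"  # red, reset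
--         lines[i] = line
--     return "\n".join(lines)
-- ===== SOURCE B (Python) =====
-- BOLD, CYAN, GREEN, RED, RESET = "\033[1m", "\033[36m", "\033[32m", "\033[31m", "\033[0m"
--
--
-- def _code_at(s, i):
--     """ANSI code for the line starting at position i (dispatch on its first character)."""
--     c = s[i] if i < len(s) else ""
--     if c == "+":
--         return BOLD if s.startswith("+++", i) else GREEN
--     if c == "-":
--         return BOLD if s.startswith("---", i) else RED
--     if c == "@":
--         return CYAN if s.startswith("@@", i) else ""
--     return ""
--
--
-- def color_diff(contents: str) -> str:
--     """Inject the ANSI color codes to the diff (single streaming pass, no split)."""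
--     out = []
--     i = 0
--     while True:
--         code = _code_at(contents, i)
--         if code:
--             out.append(code)
--         j = contents.find("\n", i)
--         out.append(contents[i:] if j == -1 else contents[i:j])
--         if code:
--             out.append(RESET)
--         if j == -1:
--             return "".join(out)
--         out.append("\n")
--         i = j + 1
-- ===== Notes on version B (the rewrite author's own statement) =====
-- stated objective: alternative
-- what changed: B makes one streaming pass over the raw string (find the next newline, emit colour codes and resets inline, colour chosen by dispatching on the line's first character), instead of A's split-into-lines, per-line if/elif rewrap, and join.
import Mathlib
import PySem

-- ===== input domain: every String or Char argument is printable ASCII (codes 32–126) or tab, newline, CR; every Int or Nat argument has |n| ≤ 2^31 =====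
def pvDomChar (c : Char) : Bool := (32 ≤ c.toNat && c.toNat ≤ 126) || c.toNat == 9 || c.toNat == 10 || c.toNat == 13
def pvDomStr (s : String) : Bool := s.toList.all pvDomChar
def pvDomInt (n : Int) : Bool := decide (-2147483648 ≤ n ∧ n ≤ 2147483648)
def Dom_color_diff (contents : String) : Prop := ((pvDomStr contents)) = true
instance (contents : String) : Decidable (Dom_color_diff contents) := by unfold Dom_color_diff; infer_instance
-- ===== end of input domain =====

-- B replaces A's split / per-line if-elif rewrap / join by a single streaming pass over the
-- raw character stream, choosing the colour by dispatch on the line's first character.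

-- ===== PORT A =====
-- A's enumerate-and-assign loop over contents.split("\n") becomes a map over the split lines.
def colorChainA (line : List Char) : List Char :=
  if PySem.Chars.startswith line "+++".toList || PySem.Chars.startswith line "---".toList then
    "\x1b[1m".toList ++ line ++ "\x1b[0m".toList
  else if PySem.Chars.startswith line "@@".toList then
    "\x1b[36m".toList ++ line ++ "\x1b[0m".toList
  else if PySem.Chars.startswith line "+".toList then
    "\x1b[32m".toList ++ line ++ "\x1b[0m".toList
  else if PySem.Chars.startswith line "-".toList then
    "\x1b[31m".toList ++ line ++ "\x1b[0m".toList
  else line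

def color_diff (contents : String) : String :=
  let lines := PySem.Chars.splitOn contents.toList "\n".toList
  String.ofList (PySem.Chars.join "\n".toList (lines.map colorChainA))

-- ===== PORT B =====
def pvReset : List Char := ['\x1b', '[', '0', 'm']
def pvBold  : List Char := ['\x1b', '[', '1', 'm']
def pvCyan  : List Char := ['\x1b', '[', '3', '6', 'm']
def pvGreen : List Char := ['\x1b', '[', '3', '2', 'm']
def pvRed   : List Char := ['\x1b', '[', '3', '1', 'm']

-- Source B's _code_at(s, i): here cs is the suffix of the string starting at position i,
-- so 's.startswith(p, i)' is 'startswith cs p' and 's[i]' is cs's head.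
def pvCodeAt (cs : List Char) : List Char :=
  match cs with
  | [] => []
  | c :: _ =>
    if c = '+' then (if PySem.Chars.startswith cs ['+', '+', '+'] then pvBold else pvGreen)
    else if c = '-' then (if PySem.Chars.startswith cs ['-', '-', '-'] then pvBold else pvRed)
    else if c = '@' then (if PySem.Chars.startswith cs ['@', '@'] then pvCyan else [])
    else []

-- Source B's while loop over positions i; cs is the suffix from i.  On that suffix,
-- contents.find("\n", i) = -1 is the [] case of dropWhile (≠ '\n'), and the slices
-- contents[i:j] / contents[i:] are takeWhile (≠ '\n'); i = j + 1 continues past the '\n'.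
def pvStream (cs : List Char) : List Char :=
  let code := pvCodeAt cs
  let line := cs.takeWhile (· ≠ '\n')
  let seg := code ++ line ++ (if code.isEmpty then [] else pvReset)
  match h : cs.dropWhile (· ≠ '\n') with
  | [] => seg
  | _ :: rest => seg ++ '\n' :: pvStream rest
termination_by cs.length
decreasing_by
  have hle := List.length_dropWhile_le (p := fun c => decide (c ≠ '\n')) (l := cs)
  simp only [h, List.length_cons] at hle
  omega

def color_diff_alt (contents : String) : String :=
  String.ofList (pvStream contents.toList)

-- ===== PRECONDITION & SPEC =====
def Spec_color_diff (contents : String) (out : String) : Prop := out = color_diff_alt contents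
instance (contents : String) (out : String) : Decidable (Spec_color_diff contents out) := by unfold Spec_color_diff; infer_instance

-- ===== CLAIM (what is proved, stated in full; the proofs are below) =====
def Claim_equal_color_diff : Prop := ∀ (contents : String), Dom_color_diff contents → Spec_color_diff contents (color_diff contents)

-- ===== LEMMAS AND PROOFS =====

-- The structural single-'\n' split both sides reduce to: head line, then the split of the rest.
def pvSplitNl (cs : List Char) : List (List Char) :=
  cs.takeWhile (· ≠ '\n') ::
    (match h : cs.dropWhile (· ≠ '\n') with
     | [] => []
     | _ :: rest => pvSplitNl rest)
termination_by cs.length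
decreasing_by
  have hle := List.length_dropWhile_le (p := fun c => decide (c ≠ '\n')) (l := cs)
  simp only [h, List.length_cons] at hle
  omega

-- Characterisation of PySem's fuel-driven splitOn.go for the single-char separator '\n'.
theorem go_nl (fuel : Nat) : ∀ (l cur : List Char) (hacc : List (List Char)),
    l.length < fuel →
    PySem.Chars.splitOn.go ['\n'] fuel l cur hacc =
      hacc.reverse ++ List.modifyHead (cur.reverse ++ ·) (pvSplitNl l) := by
  induction fuel with
  | zero => intro l cur acc h; omega
  | succ f ih =>
    intro l cur acc h
    cases l with
    | nil =>
      rw [PySem.Chars.splitOn.go, pvSplitNl]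
      simp
      omega
    | cons c rest =>
      rw [PySem.Chars.splitOn.go]
      by_cases hc : c = '\n'
      · subst hc
        have hpre : List.isPrefixOf ['\n'] ('\n' :: rest) = true := by simp [List.isPrefixOf]
        simp only [hpre, if_pos, List.length_cons, List.drop_succ_cons, List.length_nil,
          List.drop_zero]
        rw [ih rest [] (cur.reverse :: acc) (by simp at h; omega)]
        rw [pvSplitNl]
        conv_rhs => rw [pvSplitNl]
        simp
        rw [List.dropWhile_cons]
        simp
        conv_rhs => rw [pvSplitNl]
        simp
      · have hpre : List.isPrefixOf ['\n'] (c :: rest) = false := by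
          simp [List.isPrefixOf, Ne.symm hc]
        simp only [hpre, Bool.false_eq_true, if_false]
        rw [ih rest (c :: cur) acc (by simp at h; omega)]
        conv_lhs => rw [pvSplitNl]
        conv_rhs => rw [pvSplitNl]
        have hd : List.dropWhile (fun x => decide ¬x = '\n') (c :: rest) =
            List.dropWhile (fun x => decide ¬x = '\n') rest := by
          rw [List.dropWhile_cons]
          simp [hc]
        simp [hc, List.takeWhile_cons]
        rw [hd]

theorem splitOn_eq_pvSplitNl (cs : List Char) :
    PySem.Chars.splitOn cs ['\n'] = pvSplitNl cs := by
  rw [PySem.Chars.splitOn]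
  rw [go_nl (cs.length + 1) cs [] [] (by omega)]
  conv_rhs => rw [pvSplitNl]
  conv_lhs => rw [pvSplitNl]
  simp

-- startswith is unchanged by cutting the line at the first '\n' when the pattern has none.
theorem sw_takeWhile (p : List Char) (hp : '\n' ∉ p) : ∀ (t : List Char),
    PySem.Chars.startswith (t.takeWhile (· ≠ '\n')) p = PySem.Chars.startswith t p := by
  induction p with
  | nil => intro t; simp [PySem.Chars.startswith, List.isPrefixOf]
  | cons a p' ih =>
    intro t
    have ha : a ≠ '\n' := fun h => hp (h ▸ List.mem_cons_self ..)
    cases t with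
    | nil => simp [PySem.Chars.startswith, List.isPrefixOf]
    | cons c t' =>
      by_cases hc : c = '\n'
      · subst hc
        simp [PySem.Chars.startswith, List.isPrefixOf, List.takeWhile]
        intro h; exact absurd h ha
      · have := ih (fun h => hp (List.mem_cons_of_mem _ h)) t'
        simp [PySem.Chars.startswith, List.isPrefixOf, List.takeWhile, hc] at this ⊢
        rw [this]

-- B's inline code/reset emission around one line equals A's per-line chain.
theorem seg_eq_chain (cs : List Char) :
    pvCodeAt cs ++ cs.takeWhile (· ≠ '\n') ++
      (if (pvCodeAt cs).isEmpty then [] else pvReset) =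
    colorChainA (cs.takeWhile (· ≠ '\n')) := by
  cases cs with
  | nil => simp [pvCodeAt, colorChainA, PySem.Chars.startswith, List.isPrefixOf]
  | cons c t =>
    by_cases hc : c = '\n'
    · subst hc
      simp [pvCodeAt, colorChainA, PySem.Chars.startswith, List.isPrefixOf, List.takeWhile]
    · have htw : (c :: t).takeWhile (· ≠ '\n') = c :: t.takeWhile (· ≠ '\n') := by
        simp [List.takeWhile_cons, hc]
      have h2 : ∀ (p : List Char), '\n' ∉ p →
          p.isPrefixOf (t.takeWhile (· ≠ '\n')) = p.isPrefixOf t := by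
        intro p hp
        have := sw_takeWhile p hp t
        simpa [PySem.Chars.startswith] using this
      rw [htw]
      revert h2
      generalize List.takeWhile (fun x => decide (x ≠ '\n')) t = tw
      intro h2
      by_cases h1 : c = '+'
      · subst h1
        by_cases hb : List.isPrefixOf ['+', '+'] t = true <;>
          simp [pvCodeAt, colorChainA, PySem.Chars.startswith, List.isPrefixOf,
            h2 ['+', '+'] (by decide), hb, pvBold, pvGreen, pvReset]
      · by_cases h3 : c = '-'
        · subst h3
          by_cases hb : List.isPrefixOf ['-', '-'] t = true <;>
            simp [pvCodeAt, colorChainA, PySem.Chars.startswith, List.isPrefixOf,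
              h2 ['-', '-'] (by decide), hb, pvBold, pvRed, pvReset]
        · by_cases h4 : c = '@'
          · subst h4
            by_cases hb : List.isPrefixOf ['@'] t = true <;>
              simp [pvCodeAt, colorChainA, PySem.Chars.startswith, List.isPrefixOf,
                h2 ['@'] (by decide), hb, pvCyan, pvReset]
          · have h1' : ¬('+' = c) := fun h => h1 h.symm
            have h3' : ¬('-' = c) := fun h => h3 h.symm
            have h4' : ¬('@' = c) := fun h => h4 h.symm
            simp [pvCodeAt, colorChainA, PySem.Chars.startswith, List.isPrefixOf,
              h1, h3, h4, h1', h3', h4']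

-- The streaming pass equals split-then-rewrap-then-join.
theorem stream_eq_join (cs : List Char) :
    pvStream cs = PySem.Chars.join ['\n'] ((pvSplitNl cs).map colorChainA) := by
  induction cs using pvStream.induct with
  | case1 cs h =>
    rw [pvStream]
    rw [h]
    conv_rhs => rw [pvSplitNl]; rw [h]
    simp only [List.map_cons, List.map_nil, PySem.Chars.join_singleton]
    exact seg_eq_chain cs
  | case2 cs c rest h ih =>
    have hnn : pvSplitNl rest ≠ [] := by rw [pvSplitNl]; simp
    rw [pvStream]
    rw [h]
    conv_rhs => rw [pvSplitNl]; rw [h]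
    dsimp only
    rcases hL : pvSplitNl rest with _ | ⟨a, L⟩
    · exact absurd hL hnn
    · rw [ih, hL]
      simp only [List.map_cons, PySem.Chars.join_cons_cons]
      rw [seg_eq_chain cs]
      simp

-- ===== VERDICT (by name: the statement is the Claim_ definition above) =====
theorem color_diff_spec : Claim_equal_color_diff := by
  intro contents _
  show color_diff contents = color_diff_alt contents
  unfold color_diff color_diff_alt
  rw [stream_eq_join]
  simp only [show "\n".toList = ['\n'] from rfl]
  rw [splitOn_eq_pvSplitNl]
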